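-- pv_equiv track=rewrite | github.com/ppookkiesbubu/OOP | lab2/no9.py | day_in_year
-- ===== SOURCE A (Python) =====
-- def is_leap(year):
--     if year%4 == 0 and (year%100 != 0 or year%400 == 0):
--         leap = 1
--     else: leap = 0
--     return leap
--
-- def day_in_year(y1,y2):
--     sum = 0
--     for i in range(y1,y2):
--         if is_leap(i)==1:
--             sum += 366
--         else:
--             sum+=365
--     return sum
-- ===== SOURCE B (Python) =====
-- def day_in_year(y1, y2):
--     if y2 <= y1:
--         return 0
--     def leaps_before(n):
--         m = n - 1
--         return m // 4 - m // 100 + m // 400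
--     return 365 * (y2 - y1) + leaps_before(y2) - leaps_before(y1)
-- ===== Notes on version B (the rewrite author's own statement) =====
-- stated objective: faster
-- what changed: Replaced the per-year loop with a closed-form count: 365*(y2-y1) plus the number of leap years in [y1,y2) computed via floor((n-1)/4)-floor((n-1)/100)+floor((n-1)/400) at both endpoints.
import Mathlib
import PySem

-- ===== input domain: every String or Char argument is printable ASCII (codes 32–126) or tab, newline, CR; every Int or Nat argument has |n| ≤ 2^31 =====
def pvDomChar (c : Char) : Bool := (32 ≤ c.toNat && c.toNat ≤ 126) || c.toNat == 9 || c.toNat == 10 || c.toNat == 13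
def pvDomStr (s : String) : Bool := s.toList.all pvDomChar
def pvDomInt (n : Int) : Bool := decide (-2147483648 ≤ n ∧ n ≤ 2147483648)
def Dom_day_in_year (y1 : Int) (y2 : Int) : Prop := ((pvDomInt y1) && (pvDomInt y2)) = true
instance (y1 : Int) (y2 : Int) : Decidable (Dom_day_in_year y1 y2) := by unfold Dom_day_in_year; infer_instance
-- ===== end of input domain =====

-- B replaces A's per-year loop by an O(1) closed form (365 per year + endpoint leap counts); return values are equal for all integer inputs.

-- ===== PORT A =====
def pv_is_leap (year : Int) : Int :=
  if PySem.Int.mod year 4 = 0 ∧ (PySem.Int.mod year 100 ≠ 0 ∨ PySem.Int.mod year 400 = 0)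
  then 1 else 0

def day_in_year (y1 : Int) (y2 : Int) : Int :=
  (PySem.List.pyRange y1 y2 1).foldl
    (fun s i => if pv_is_leap i = 1 then s + 366 else s + 365) 0

-- ===== PORT B =====
def pv_leaps_before (n : Int) : Int :=
  PySem.Int.floordiv (n - 1) 4 - PySem.Int.floordiv (n - 1) 100 + PySem.Int.floordiv (n - 1) 400

def day_in_year_alt (y1 : Int) (y2 : Int) : Int :=
  if y2 ≤ y1 then 0
  else 365 * (y2 - y1) + pv_leaps_before y2 - pv_leaps_before y1

-- ===== PRECONDITION & SPEC =====
def Spec_day_in_year (y1 : Int) (y2 : Int) (out : Int) : Prop := out = day_in_year_alt y1 y2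
instance (y1 : Int) (y2 : Int) (out : Int) : Decidable (Spec_day_in_year y1 y2 out) := by unfold Spec_day_in_year; infer_instance

-- ===== CLAIM (what is proved, stated in full; the proofs are below) =====
def Claim_equal_day_in_year : Prop := ∀ (y1 : Int) (y2 : Int), Dom_day_in_year y1 y2 → Spec_day_in_year y1 y2 (day_in_year y1 y2)

-- ===== LEMMAS AND PROOFS =====

-- one step of the closed form: the leap count increases across y exactly by A's 0/1 indicator
lemma pv_leaps_before_step (y : Int) :
    pv_leaps_before (y + 1) - pv_leaps_before y = pv_is_leap y := by
  unfold pv_leaps_before pv_is_leap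
  rw [PySem.Int.floordiv_eq_ediv_of_pos (a := y + 1 - 1) (by norm_num : (0:Int) < 4),
      PySem.Int.floordiv_eq_ediv_of_pos (a := y + 1 - 1) (by norm_num : (0:Int) < 100),
      PySem.Int.floordiv_eq_ediv_of_pos (a := y + 1 - 1) (by norm_num : (0:Int) < 400),
      PySem.Int.floordiv_eq_ediv_of_pos (a := y - 1) (by norm_num : (0:Int) < 4),
      PySem.Int.floordiv_eq_ediv_of_pos (a := y - 1) (by norm_num : (0:Int) < 100),
      PySem.Int.floordiv_eq_ediv_of_pos (a := y - 1) (by norm_num : (0:Int) < 400),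
      PySem.Int.mod_eq_emod_of_pos (a := y) (by norm_num : (0:Int) < 4),
      PySem.Int.mod_eq_emod_of_pos (a := y) (by norm_num : (0:Int) < 100),
      PySem.Int.mod_eq_emod_of_pos (a := y) (by norm_num : (0:Int) < 400)]
  split_ifs with h
  · omega
  · omega

-- closed form without the branch, valid when y1 ≤ y2
lemma alt_of_le (y1 y2 : Int) (h : y1 ≤ y2) :
    day_in_year_alt y1 y2 = 365 * (y2 - y1) + pv_leaps_before y2 - pv_leaps_before y1 := by
  unfold day_in_year_alt
  split_ifs with h2
  · have : y1 = y2 := le_antisymm h h2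
    subst this; ring
  · rfl

lemma key (n : Nat) (y1 : Int) :
    day_in_year y1 (y1 + n) = day_in_year_alt y1 (y1 + n) := by
  induction n with
  | zero =>
      unfold day_in_year day_in_year_alt
      rw [PySem.List.pyRange_one_eq_nil (by omega)]
      simp
  | succ n ih =>
      unfold day_in_year
      have hle : y1 ≤ y1 + (n : Int) := by omega
      have hsplit : PySem.List.pyRange y1 (y1 + (n + 1 : Nat)) 1
          = PySem.List.pyRange y1 (y1 + (n : Int)) 1 ++ [y1 + (n : Int)] := by
        push_cast
        rw [show y1 + ((n : Int) + 1) = (y1 + (n : Int)) + 1 by ring,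
            PySem.List.pyRange_one_succ_right hle]
      rw [hsplit, List.foldl_append]
      have ihA : (PySem.List.pyRange y1 (y1 + (n : Int)) 1).foldl
          (fun s i => if pv_is_leap i = 1 then s + 366 else s + 365) 0
          = day_in_year_alt y1 (y1 + (n : Int)) := ih
      rw [ihA]
      have h1 : day_in_year_alt y1 (y1 + (n : Int))
          = 365 * ((y1 + (n : Int)) - y1) + pv_leaps_before (y1 + (n : Int)) - pv_leaps_before y1 :=
        alt_of_le _ _ hle
      have h2 : day_in_year_alt y1 (y1 + ((n : Nat) + 1 : Nat))
          = 365 * ((y1 + ((n : Int) + 1)) - y1) + pv_leaps_before (y1 + (n : Int) + 1) - pv_leaps_before y1 := by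
        have := alt_of_le y1 (y1 + (n : Int) + 1) (by omega)
        push_cast
        rw [show y1 + ((n : Int) + 1) = (y1 + (n : Int)) + 1 by ring]
        exact this
      have hstep := pv_leaps_before_step (y1 + (n : Int))
      simp only [List.foldl]
      rw [h1, h2]
      by_cases hl : pv_is_leap (y1 + (n : Int)) = 1
      · rw [if_pos hl]; rw [hl] at hstep; omega
      · rw [if_neg hl]
        have : pv_is_leap (y1 + (n : Int)) = 0 := by
          unfold pv_is_leap at hl ⊢; split_ifs at hl ⊢ <;> omega
        rw [this] at hstep; omega

-- ===== VERDICT (by name: the statement is the Claim_ definition above) =====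
theorem day_in_year_spec : Claim_equal_day_in_year := by
  intro y1 y2 _
  unfold Spec_day_in_year
  by_cases h : y2 ≤ y1
  · unfold day_in_year day_in_year_alt
    rw [PySem.List.pyRange_one_eq_nil h, if_pos h]
    rfl
  · have h' : y1 ≤ y2 := le_of_not_ge h
    have : y2 = y1 + ((y2 - y1).toNat : Int) := by omega
    rw [this]
    exact key _ y1
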